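-- pv_equiv track=rewrite | github.com/mbaocha/dialogcart | src/luma/structure/rules.py | determine_service_scope
-- ===== SOURCE A (Python) =====
-- from typing import Dict, List, Any
--
-- BOOKING_VERBS = {
--     "book", "schedule", "reserve", "reservation", "appointment",
--     "appoint", "set", "arrange", "plan"
-- }
--
-- CONJUNCTIONS = {"and", "or", "plus", "&"}
--
-- def tokenize_psentence(psentence: str) -> List[str]:
--     """
--     Tokenize parameterized sentence into list of tokens.
--
--     Args:
--         psentence: Parameterized sentence string
--
--     Returns:
--         List of lowercase tokens
--     """
--     return psentence.lower().split()
--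
-- def determine_service_scope(psentence: str, entities: Dict[str, List]) -> str:
--     """
--     Rule 2: Determine service scope.
--
--     If multiple servicefamilytokens joined by conjunctions
--     without verb reset → shared
--
--     Else → separate
--
--     Args:
--         psentence: Parameterized sentence
--         entities: Entity dictionary (for counting services)
--
--     Returns:
--         "shared" or "separate"
--     """
--     service_count = len(entities.get("service_families", []))
--
--     if service_count <= 1:
--         return "separate"
--
--     tokens = tokenize_psentence(psentence)
--
--     # Find all servicefamilytoken positions
--     service_positions = []
--     for i, token in enumerate(tokens):
--         if token == "servicefamilytoken":
--             service_positions.append(i)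
--
--     if len(service_positions) < 2:
--         return "separate"
--
--     # Check if services are joined by conjunctions without verbs between them
--     for i in range(len(service_positions) - 1):
--         start = service_positions[i]
--         end = service_positions[i + 1]
--
--         # Extract tokens between two service tokens
--         between_tokens = tokens[start + 1:end]
--
--         # Check if there's a booking verb between services
--         has_verb_between = any(token in BOOKING_VERBS for token in between_tokens)
--
--         # Check if joined by conjunction
--         has_conjunction = any(token in CONJUNCTIONS for token in between_tokens)
--
--         # If verb between services → separate
--         if has_verb_between:
--             return "separate"
--
--         # If no conjunction → separate
--         if not has_conjunction:
--             return "separate"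
--
--     # All services joined by conjunctions without verbs → shared
--     return "shared"
-- ===== SOURCE B (Python) =====
-- BOOKING_VERBS = {
--     "book", "schedule", "reserve", "reservation", "appointment",
--     "appoint", "set", "arrange", "plan"
-- }
--
-- CONJUNCTIONS = {"and", "or", "plus", "&"}
--
--
-- def determine_service_scope(psentence, entities):
--     """Single-pass state machine: no position list, no slicing.
--
--     Walk the tokens once, keeping a count of service tokens seen and
--     per-gap has_verb / has_conjunction flags; judge each gap the moment
--     the next service token closes it.
--     """
--     if len(entities.get("service_families", [])) <= 1:
--         return "separate"
--
--     seen = 0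
--     has_verb = False
--     has_conj = False
--     for token in psentence.lower().split():
--         if token == "servicefamilytoken":
--             if seen >= 1:
--                 if has_verb or not has_conj:
--                     return "separate"
--                 has_verb = False
--                 has_conj = False
--             seen += 1
--         elif seen >= 1:
--             if token in BOOKING_VERBS:
--                 has_verb = True
--             if token in CONJUNCTIONS:
--                 has_conj = True
--
--     return "shared" if seen >= 2 else "separate"
-- ===== Notes on version B (the rewrite author's own statement) =====
-- stated objective: simpler
-- what changed: Replaced A's three passes (enumerate positions of service tokens, guard on their count, then slice the token list between each consecutive pair and scan the slices) by a single pass over the tokens that keeps a seen-counter and per-gap has_verb/has_conjunction flags, judging each gap the moment the next service token closes it.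
import Mathlib
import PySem

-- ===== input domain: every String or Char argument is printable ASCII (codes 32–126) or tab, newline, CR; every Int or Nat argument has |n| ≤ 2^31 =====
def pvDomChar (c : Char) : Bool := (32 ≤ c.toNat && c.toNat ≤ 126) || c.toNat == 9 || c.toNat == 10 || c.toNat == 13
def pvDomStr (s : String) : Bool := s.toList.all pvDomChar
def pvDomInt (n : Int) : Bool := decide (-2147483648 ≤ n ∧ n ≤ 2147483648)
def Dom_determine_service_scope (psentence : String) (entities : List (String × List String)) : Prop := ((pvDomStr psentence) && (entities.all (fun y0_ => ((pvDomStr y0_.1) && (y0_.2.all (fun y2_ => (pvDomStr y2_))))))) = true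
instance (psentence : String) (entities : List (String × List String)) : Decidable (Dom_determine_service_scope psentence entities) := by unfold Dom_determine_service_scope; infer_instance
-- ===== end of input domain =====

-- B replaces A's position-list + slice passes by one single-pass state machine over the tokens (simpler; same cost).

-- ===== PORT A =====
def BOOKING_VERBS : PySem.Set String := PySem.Set.ofList
  ["book", "schedule", "reserve", "reservation", "appointment",
   "appoint", "set", "arrange", "plan"]

def CONJUNCTIONS : PySem.Set String := PySem.Set.ofList ["and", "or", "plus", "&"]

def tokenize_psentence (psentence : String) : List String :=
  PySem.Str.split₀ (PySem.Str.lower psentence)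

-- the 'for i in range(len(service_positions) - 1)' loop, walking consecutive positions
def pvCheckGaps (tokens : List String) : List Int → String
  | p1 :: p2 :: rest =>
      let between := PySem.List.slice tokens (some (p1 + 1)) (some p2)
      let has_verb_between := between.any (fun t => PySem.Set.contains BOOKING_VERBS t)
      let has_conjunction := between.any (fun t => PySem.Set.contains CONJUNCTIONS t)
      if has_verb_between then "separate"
      else if !has_conjunction then "separate"
      else pvCheckGaps tokens (p2 :: rest)
  | _ => "shared"

def determine_service_scope (psentence : String) (entities : List (String × List String)) : String :=
  let service_count := (PySem.Dict.getD ⟨entities⟩ "service_families" ([] : List String)).length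
  if service_count ≤ 1 then "separate"
  else
    let tokens := tokenize_psentence psentence
    let service_positions :=
      (PySem.List.enumerate tokens 0).foldl
        (fun acc it => if it.2 == "servicefamilytoken" then acc ++ [it.1] else acc)
        ([] : List Int)
    if service_positions.length < 2 then "separate"
    else pvCheckGaps tokens service_positions

-- ===== PORT B =====
-- single pass: count of service tokens seen + per-gap has_verb / has_conj flags
def pvScan : List String → Nat → Bool → Bool → String
  | [], seen, _, _ => if 2 ≤ seen then "shared" else "separate"
  | t :: rest, seen, hv, hc =>
      if t == "servicefamilytoken" then
        if 1 ≤ seen then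
          if hv || !hc then "separate"
          else pvScan rest (seen + 1) false false
        else pvScan rest (seen + 1) hv hc
      else if 1 ≤ seen then
        pvScan rest seen (hv || PySem.Set.contains BOOKING_VERBS t)
          (hc || PySem.Set.contains CONJUNCTIONS t)
      else pvScan rest seen hv hc

def determine_service_scope_alt (psentence : String) (entities : List (String × List String)) : String :=
  if (PySem.Dict.getD ⟨entities⟩ "service_families" ([] : List String)).length ≤ 1 then "separate"
  else pvScan (PySem.Str.split₀ (PySem.Str.lower psentence)) 0 false false

-- ===== PRECONDITION & SPEC =====
def Spec_determine_service_scope (psentence : String) (entities : List (String × List String)) (out : String) : Prop := out = determine_service_scope_alt psentence entities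
instance (psentence : String) (entities : List (String × List String)) (out : String) : Decidable (Spec_determine_service_scope psentence entities out) := by unfold Spec_determine_service_scope; infer_instance

-- ===== CLAIM (what is proved, stated in full; the proofs are below) =====
def Claim_equal_determine_service_scope : Prop := ∀ (psentence : String) (entities : List (String × List String)), Dom_determine_service_scope psentence entities → Spec_determine_service_scope psentence entities (determine_service_scope psentence entities)

-- ===== LEMMAS AND PROOFS =====

-- positions of "servicefamilytoken", computed structurally
def posF : List String → List Int
  | [] => []
  | t :: ts =>
      if t = "servicefamilytoken" then 0 :: (posF ts).map (· + 1)
      else (posF ts).map (· + 1)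

theorem posF_nonneg : ∀ (ts : List String), ∀ p ∈ posF ts, 0 ≤ p := by
  intro ts
  induction ts with
  | nil => simp [posF]
  | cons t ts ih =>
      intro p hp
      simp only [posF] at hp
      split at hp
      · rcases List.mem_cons.mp hp with h | h
        · omega
        · rcases List.mem_map.mp h with ⟨q, hq, rfl⟩; have := ih q hq; omega
      · rcases List.mem_map.mp hp with ⟨q, hq, rfl⟩; have := ih q hq; omega

theorem posF_eq_nil_iff (ts : List String) : posF ts = [] ↔ "servicefamilytoken" ∉ ts := by
  induction ts with
  | nil => simp [posF]
  | cons t ts ih =>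
      by_cases h : t = "servicefamilytoken"
      · simp [posF, h]
      · simp only [posF, if_neg h, List.map_eq_nil_iff, ih, List.mem_cons, not_or]
        constructor
        · intro hn; exact ⟨fun he => h he.symm, hn⟩
        · rintro ⟨_, hn⟩; exact hn

theorem map_add_add {l : List Int} {a b : Int} :
    (l.map (· + a)).map (· + b) = l.map (· + (a + b)) := by
  rw [List.map_map]; apply List.map_congr_left; intro x _; simp; ring

theorem map_add_congr {l : List Int} {a b : Int} (h : a = b) :
    l.map (· + a) = l.map (· + b) := by rw [h]

theorem posA_eq_posF (ts : List String) (n : Int) :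
    ((PySem.List.enumerate ts n).filter (fun it => it.2 == "servicefamilytoken")).map (·.1)
      = (posF ts).map (· + n) := by
  induction ts generalizing n with
  | nil => simp [PySem.List.enumerate_nil, posF]
  | cons t ts ih =>
      rw [PySem.List.enumerate_cons, List.filter_cons]
      by_cases h : t = "servicefamilytoken"
      · have hb : ((n, t).2 == "servicefamilytoken") = true := by simp [h]
        rw [if_pos hb]
        simp only [posF, if_pos h, List.map_cons, ih, map_add_add]
        exact List.cons_eq_cons.mpr ⟨by ring, map_add_congr (by ring)⟩
      · have hb : ((n, t).2 == "servicefamilytoken") = false := beq_eq_false_iff_ne.mpr h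
        rw [hb]
        simp only [Bool.false_eq_true, if_false, posF, if_neg h, ih, map_add_add]
        exact map_add_congr (by ring)

theorem slice_shift {α : Type} (x : α) (xs : List α) (a b : Int) (ha : 0 ≤ a) (hb : 0 ≤ b) :
    PySem.List.slice (x :: xs) (some (a + 1)) (some (b + 1))
      = PySem.List.slice xs (some a) (some b) := by
  rw [PySem.List.slice_toNat _ (by omega) (by omega), PySem.List.slice_toNat _ ha hb]
  have h1 : (a + 1).toNat = a.toNat + 1 := by omega
  have h2 : (b + 1).toNat = b.toNat + 1 := by omega
  rw [h1, h2, List.drop_succ_cons]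
  congr 1
  omega

theorem checkGaps_shift (t : String) (tokens : List String) (ps : List Int)
    (h : ∀ p ∈ ps, 0 ≤ p) :
    pvCheckGaps (t :: tokens) (ps.map (· + 1)) = pvCheckGaps tokens ps := by
  induction ps with
  | nil => rfl
  | cons p1 tl ih =>
      cases tl with
      | nil => rfl
      | cons p2 rest =>
          have hp1 : 0 ≤ p1 := h p1 (by simp)
          have hp2 : 0 ≤ p2 := h p2 (by simp)
          simp only [List.map_cons, pvCheckGaps]
          rw [slice_shift t tokens (p1 + 1) p2 (by omega) hp2]
          have ih' := ih (fun p hp => h p (List.mem_cons_of_mem _ hp))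
          simp only [List.map_cons] at ih'
          rw [ih']

theorem checkGaps_prepend (pre tokens : List String) (ps : List Int)
    (h : ∀ p ∈ ps, 0 ≤ p) :
    pvCheckGaps (pre ++ tokens) (ps.map (· + (pre.length : Int))) = pvCheckGaps tokens ps := by
  induction pre with
  | nil => simp
  | cons x pre ih =>
      have hmap : ps.map (· + ((x :: pre).length : Int))
          = (ps.map (· + (pre.length : Int))).map (· + 1) := by
        rw [map_add_add]; exact map_add_congr (by simp)
      rw [hmap, List.cons_append,
        checkGaps_shift x (pre ++ tokens) _ (by
          intro p hp
          rcases List.mem_map.mp hp with ⟨q, hq, rfl⟩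
          have := h q hq; omega), ih]

theorem posF_append_service (g rest : List String) (hg : "servicefamilytoken" ∉ g) :
    posF (g ++ "servicefamilytoken" :: rest)
      = (g.length : Int) :: (posF rest).map (· + ((g.length : Int) + 1)) := by
  induction g with
  | nil => simp [posF]
  | cons x g ih =>
      have hx : x ≠ "servicefamilytoken" := fun h => hg (by simp [h])
      have hg' : "servicefamilytoken" ∉ g := fun h => hg (by simp [h])
      simp only [List.cons_append, posF, if_neg hx, ih hg', List.map_cons, map_add_add,
        List.length_cons]
      exact List.cons_eq_cons.mpr ⟨by push_cast; ring, map_add_congr (by push_cast; ring)⟩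

theorem first_split {l : List String} (h : "servicefamilytoken" ∈ l) :
    ∃ g t, l = g ++ "servicefamilytoken" :: t ∧ "servicefamilytoken" ∉ g := by
  induction l with
  | nil => simp at h
  | cons x l ih =>
      by_cases hx : x = "servicefamilytoken"
      · exact ⟨[], l, by simp [hx], by simp⟩
      · have h' : "servicefamilytoken" ∈ l := by
          rcases List.mem_cons.mp h with h0 | h0
          · exact absurd h0.symm hx
          · exact h0
        rcases ih h' with ⟨g, t, rfl, hg⟩
        refine ⟨x :: g, t, by simp, ?_⟩
        intro hm
        rcases List.mem_cons.mp hm with h0 | h0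
        · exact hx h0.symm
        · exact hg h0

theorem scan_noService (rest : List String) :
    ∀ (n : Nat) (hv hc : Bool), "servicefamilytoken" ∉ rest →
      pvScan rest n hv hc = (if 2 ≤ n then "shared" else "separate") := by
  induction rest with
  | nil => intro n hv hc _; rfl
  | cons t rest ih =>
      intro n hv hc h
      have ht : (t == "servicefamilytoken") = false :=
        beq_eq_false_iff_ne.mpr (fun he => h (by simp [he]))
      have h' : "servicefamilytoken" ∉ rest := fun hm => h (by simp [hm])
      simp only [pvScan, ht, Bool.false_eq_true, if_false]
      by_cases h1 : 1 ≤ n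
      · rw [if_pos h1, ih _ _ _ h']
      · rw [if_neg h1, ih _ _ _ h']

theorem scan_gap (g : List String) :
    ∀ (rest : List String) (hv hc : Bool) (n : Nat), "servicefamilytoken" ∉ g → 1 ≤ n →
      pvScan (g ++ "servicefamilytoken" :: rest) n hv hc =
        (if hv || g.any (fun t => PySem.Set.contains BOOKING_VERBS t) then "separate"
         else if !(hc || g.any (fun t => PySem.Set.contains CONJUNCTIONS t)) then "separate"
         else pvScan rest (n + 1) false false) := by
  induction g with
  | nil =>
      intro rest hv hc n _ hn
      simp only [List.nil_append, pvScan, beq_self_eq_true, if_true, List.any_nil,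
        Bool.or_false]
      rw [if_pos hn]
      cases hv <;> cases hc <;> simp
  | cons u g ih =>
      intro rest hv hc n hg hn
      have hu : (u == "servicefamilytoken") = false :=
        beq_eq_false_iff_ne.mpr (fun he => hg (by simp [he]))
      have hg' : "servicefamilytoken" ∉ g := fun hm => hg (by simp [hm])
      simp only [List.cons_append, pvScan, hu, Bool.false_eq_true, if_false]
      rw [if_pos hn, ih rest _ _ n hg' hn]
      simp only [List.any_cons, Bool.or_assoc]
      rfl

theorem checkGaps_eq_scan (rest : List String) (n : Nat) (hn1 : 1 ≤ n)
    (hn : 2 ≤ n ∨ "servicefamilytoken" ∈ rest) :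
    pvCheckGaps ("servicefamilytoken" :: rest) (0 :: (posF rest).map (· + 1))
      = pvScan rest n false false := by
  induction hL : rest.length using Nat.strong_induction_on generalizing rest n with
  | _ L IH =>
    by_cases hmem : "servicefamilytoken" ∈ rest
    · rcases first_split hmem with ⟨g, rest', rfl, hg⟩
      rw [posF_append_service g rest' hg]
      have hslice : PySem.List.slice
          ("servicefamilytoken" :: (g ++ "servicefamilytoken" :: rest'))
          (some (0 + 1)) (some ((g.length : Int) + 1)) = g := by
        rw [PySem.List.slice_toNat _ (by omega) (by omega)]
        have h1 : ((0 : Int) + 1).toNat = 1 := by omega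
        have h2 : ((g.length : Int) + 1).toNat = g.length + 1 := by omega
        rw [h1, h2, List.drop_succ_cons, List.drop_zero]
        simp [List.take_left']
      simp only [List.map_cons, pvCheckGaps, hslice]
      rw [scan_gap g rest' false false n hg hn1]
      simp only [Bool.false_or]
      split_ifs with h1 h2
      · rfl
      · rfl
      · have hrw : ((g.length : Int) + 1) ::
            ((posF rest').map (· + ((g.length : Int) + 1))).map (· + 1)
            = (0 :: (posF rest').map (· + 1)).map
                (· + ((("servicefamilytoken" :: g).length : Int))) := by
          simp only [List.map_cons, map_add_add, List.length_cons]
          exact List.cons_eq_cons.mpr ⟨by push_cast; ring, map_add_congr (by push_cast; ring)⟩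
        rw [hrw, show ("servicefamilytoken" :: (g ++ "servicefamilytoken" :: rest'))
              = ("servicefamilytoken" :: g) ++ ("servicefamilytoken" :: rest') by simp,
            checkGaps_prepend ("servicefamilytoken" :: g) ("servicefamilytoken" :: rest')
              _ (by
                intro p hp
                rcases List.mem_cons.mp hp with h | h
                · omega
                · rcases List.mem_map.mp h with ⟨q, hq, rfl⟩
                  have := posF_nonneg rest' q hq; omega)]
        exact IH rest'.length (by simp at hL; omega) rest' (n + 1) (by omega) (Or.inl (by omega)) rfl
    · have hnil : posF rest = [] := (posF_eq_nil_iff rest).mpr hmem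
      have hn2 : 2 ≤ n := by
        rcases hn with hn | hn
        · exact hn
        · exact absurd hn hmem
      rw [hnil, scan_noService rest n false false hmem]
      simp only [List.map_nil]
      rw [if_pos hn2]
      rfl

theorem scan0 (tokens : List String) :
    (if (posF tokens).length < 2 then "separate" else pvCheckGaps tokens (posF tokens))
      = pvScan tokens 0 false false := by
  induction tokens with
  | nil => rfl
  | cons t ts ih =>
      by_cases ht : t = "servicefamilytoken"
      · subst ht
        simp only [posF, if_pos, pvScan, beq_self_eq_true]
        rw [if_neg (show ¬ (1 : Nat) ≤ 0 by omega)]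
        by_cases hmem : "servicefamilytoken" ∈ ts
        · have hne : posF ts ≠ [] := fun h => ((posF_eq_nil_iff ts).mp h) hmem
          have hlen : ¬ (0 :: (posF ts).map (· + 1)).length < 2 := by
            cases hps : posF ts with
            | nil => exact absurd hps hne
            | cons a l => simp
          rw [if_neg hlen]
          exact checkGaps_eq_scan ts 1 (by omega) (Or.inr hmem)
        · have hnil : posF ts = [] := (posF_eq_nil_iff ts).mpr hmem
          rw [hnil, scan_noService ts 1 false false hmem]
          simp
      · have htb : (t == "servicefamilytoken") = false := beq_eq_false_iff_ne.mpr ht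
        simp only [posF, if_neg ht, pvScan, htb, Bool.false_eq_true, if_false,
          List.length_map]
        rw [if_neg (show ¬ (1 : Nat) ≤ 0 by omega), ← ih]
        split_ifs with h
        · rfl
        · exact checkGaps_shift t ts (posF ts) (posF_nonneg ts)

-- ===== VERDICT (by name: the statement is the Claim_ definition above) =====
theorem determine_service_scope_spec : Claim_equal_determine_service_scope := by
  intro psentence entities _
  unfold Spec_determine_service_scope determine_service_scope determine_service_scope_alt
  by_cases hcnt : (PySem.Dict.getD ⟨entities⟩ "service_families" ([] : List String)).length ≤ 1
  · simp [hcnt]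
  · simp only [hcnt, if_false]
    have hpos : (PySem.List.enumerate (tokenize_psentence psentence) 0).foldl
        (fun acc it => if it.2 == "servicefamilytoken" then acc ++ [it.1] else acc)
        ([] : List Int) = posF (tokenize_psentence psentence) := by
      rw [PySem.List.foldl_append_if (fun (it : Int × String) => it.2 == "servicefamilytoken")
        (fun (it : Int × String) => it.1)]
      have h0 := posA_eq_posF (tokenize_psentence psentence) 0
      simpa using h0
    rw [hpos]
    unfold tokenize_psentence
    exact scan0 (PySem.Str.split₀ (PySem.Str.lower psentence))
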